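-- pv_equiv track=rewrite | github.com/young31/Algorithm | 백준/1790.py | num_to_n
-- ===== SOURCE A (Python) =====
-- def num_to_n(n):
--     k = 10
--     c = 1
--     ans = 0
--     while 1:
--         if n < k:
--             ans += (n - k//10+1)*c
--             return ans
--         else:
--             if c == 1:
--                 ans += 9
--             else:
--                 ans += (k - k//10)*c
--         c += 1
--         k = 10**c
-- ===== SOURCE B (Python) =====
-- def num_to_n(n):
--     if n < 10:
--         return n
--     d = 1
--     while 10**d <= n:
--         d += 1
--     full = ((10**(d-1))*(9*(d-1)-1)+1)//9
--     return full + (n - 10**(d-1) + 1)*d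
-- ===== Notes on version B (the rewrite author's own statement) =====
-- stated objective: simpler
-- what changed: A accumulates the answer block-by-block in a while loop; B only counts the digits d of n and computes the contribution of all shorter numbers with a closed-form geometric-sum expression plus one partial term.
import Mathlib
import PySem

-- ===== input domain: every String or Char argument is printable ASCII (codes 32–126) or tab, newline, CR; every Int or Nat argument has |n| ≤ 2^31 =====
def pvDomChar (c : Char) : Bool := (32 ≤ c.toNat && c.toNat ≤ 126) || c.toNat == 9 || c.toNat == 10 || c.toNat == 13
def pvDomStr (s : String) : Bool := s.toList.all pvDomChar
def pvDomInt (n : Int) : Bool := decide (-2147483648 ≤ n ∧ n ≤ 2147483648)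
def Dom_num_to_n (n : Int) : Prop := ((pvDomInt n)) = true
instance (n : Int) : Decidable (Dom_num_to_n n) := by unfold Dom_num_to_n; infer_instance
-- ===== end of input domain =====

-- B replaces A's block-by-block accumulation loop with a digit-count plus one closed-form
-- geometric-sum expression (objective: simpler).

-- ===== PORT A =====
-- A's `while 1` loop; state (k, c, ans) with k = 10**c kept as the invariant Python maintains.
def numToNLoop (n : Int) (c : Nat) (ans : Int) : Int :=
  let k : Int := 10 ^ c
  if n < k then
    ans + (n - PySem.Int.floordiv k 10 + 1) * c
  else
    numToNLoop n (c + 1)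
      (ans + if c = 1 then 9 else (k - PySem.Int.floordiv k 10) * c)
termination_by (n + 1 - 10 ^ c).toNat
decreasing_by
  have h1 : (1:Int) ≤ 10 ^ c := one_le_pow₀ (by norm_num)
  simp only [not_lt] at *
  omega

def num_to_n (n : Int) : Int := numToNLoop n 1 0

-- ===== PORT B =====
-- B's digit-count loop: smallest d ≥ start with n < 10**d.
def digitsFrom (n : Int) (d : Nat) : Nat :=
  if (10:Int) ^ d ≤ n then digitsFrom n (d + 1) else d
termination_by (n + 1 - 10 ^ d).toNat
decreasing_by
  have h1 : (1:Int) ≤ 10 ^ d := one_le_pow₀ (by norm_num)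
  omega

def num_to_n_alt (n : Int) : Int :=
  if n < 10 then n
  else
    let d := digitsFrom n 1
    let full := PySem.Int.floordiv ((10:Int) ^ (d - 1) * (9 * ((d:Int) - 1) - 1) + 1) 9
    full + (n - 10 ^ (d - 1) + 1) * d

-- ===== PRECONDITION & SPEC =====
def Spec_num_to_n (n : Int) (out : Int) : Prop := out = num_to_n_alt n
instance (n : Int) (out : Int) : Decidable (Spec_num_to_n n out) := by unfold Spec_num_to_n; infer_instance

-- ===== CLAIM (what is proved, stated in full; the proofs are below) =====
def Claim_equal_num_to_n : Prop := ∀ (n : Int), Dom_num_to_n n → Spec_num_to_n n (num_to_n n)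

-- ===== LEMMAS AND PROOFS =====

-- T m = total number of digits of all integers in [1, 10^m - 1].
def Tsum : Nat → Int
  | 0 => 0
  | m + 1 => Tsum m + 9 * 10 ^ m * (m + 1)

theorem nine_mul_Tsum (m : Nat) : 9 * Tsum m = 10 ^ m * (9 * (m:Int) - 1) + 1 := by
  induction m with
  | zero => simp [Tsum]
  | succ m ih =>
    have : (10:Int) ^ (m + 1) = 10 * 10 ^ m := by ring
    simp only [Tsum]
    push_cast
    rw [this]
    linarith [ih]

theorem digitsFrom_of_lt (n : Int) (d : Nat) (h : n < 10 ^ d) : digitsFrom n d = d := by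
  rw [digitsFrom]
  simp [not_le.mpr h]

theorem digitsFrom_of_le (n : Int) (d : Nat) (h : (10:Int) ^ d ≤ n) :
    digitsFrom n d = digitsFrom n (d + 1) := by
  rw [digitsFrom]
  simp [h]

theorem floordiv_pow (c : Nat) (hc : 1 ≤ c) :
    PySem.Int.floordiv ((10:Int) ^ c) 10 = 10 ^ (c - 1) := by
  obtain ⟨m, rfl⟩ : ∃ m, c = m + 1 := ⟨c - 1, by omega⟩
  have h : (10:Int) ^ (m + 1) = 10 ^ m * 10 := by ring
  simp [PySem.Int.floordiv, h]

theorem digitsFrom_ge (n : Int) (d : Nat) : d ≤ digitsFrom n d := by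
  rw [digitsFrom]
  by_cases h : (10:Int) ^ d ≤ n
  · simp only [if_pos h]
    exact le_trans (by omega) (digitsFrom_ge n (d + 1))
  · simp [h]
termination_by (n + 1 - 10 ^ d).toNat
decreasing_by
  have h1 : (1:Int) ≤ 10 ^ d := one_le_pow₀ (by norm_num)
  omega

-- invariant of A's loop, phrased with B's digit counter
theorem numToNLoop_eq (n : Int) (c : Nat) (ans : Int) (hc : 1 ≤ c) :
    numToNLoop n c ans =
      ans + (Tsum (digitsFrom n c - 1) - Tsum (c - 1))
          + (n - 10 ^ (digitsFrom n c - 1) + 1) * (digitsFrom n c) := by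
  rw [numToNLoop]
  by_cases h : n < 10 ^ c
  · rw [digitsFrom_of_lt n c h]
    simp only [if_pos h, floordiv_pow c hc]
    ring
  · rw [not_lt] at h
    simp only [if_neg (not_lt.mpr h)]
    rw [numToNLoop_eq n (c + 1) _ (by omega)]
    rw [digitsFrom_of_le n c h]
    have hk : (10:Int) ^ c = 10 * 10 ^ (c - 1) := by
      obtain ⟨m, rfl⟩ : ∃ m, c = m + 1 := ⟨c - 1, by omega⟩
      simp only [Nat.add_sub_cancel]
      ring
    have hinc : (if c = 1 then (9:Int)
        else ((10:Int) ^ c - PySem.Int.floordiv ((10:Int) ^ c) 10) * c) = 9 * 10 ^ (c - 1) * c := by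
      split_ifs with h1
      · subst h1; norm_num
      · rw [floordiv_pow c hc, hk]; ring
    have hTc : Tsum c = Tsum (c - 1) + 9 * 10 ^ (c - 1) * c := by
      obtain ⟨m, rfl⟩ : ∃ m, c = m + 1 := ⟨c - 1, by omega⟩
      simp [Tsum]
    rw [hinc]
    simp only [Nat.add_sub_cancel]
    rw [hTc]
    ring
termination_by (n + 1 - 10 ^ c).toNat
decreasing_by
  have h1 : (1:Int) ≤ 10 ^ c := one_le_pow₀ (by norm_num)
  omega

-- ===== VERDICT (by name: the statement is the Claim_ definition above) =====
theorem num_to_n_spec : Claim_equal_num_to_n := by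
  intro n _
  unfold Spec_num_to_n num_to_n num_to_n_alt
  rw [numToNLoop_eq n 1 0 le_rfl]
  by_cases h : n < 10
  · have : n < (10:Int) ^ 1 := by simpa using h
    rw [digitsFrom_of_lt n 1 this]
    simp [Tsum, h]
  · rw [not_lt] at h
    simp only [if_neg (not_lt.mpr h)]
    set d := digitsFrom n 1 with hd
    have hd1 : 1 ≤ d := digitsFrom_ge n 1
    have hfull : PySem.Int.floordiv ((10:Int) ^ (d - 1) * (9 * ((d:Int) - 1) - 1) + 1) 9
        = Tsum (d - 1) := by
      have hcast : ((d:Int) - 1) = ((d - 1 : Nat) : Int) := by omega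
      rw [hcast, ← nine_mul_Tsum (d - 1)]
      simp [PySem.Int.floordiv]
    rw [hfull]
    simp [Tsum]
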